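-- pv_equiv track=rewrite | github.com/JIE77777/Wagstaff-Lab | core/analyzer.py | _long_bracket_level
-- ===== SOURCE A (Python) =====
-- from typing import Any, Dict, Iterator, List, Optional, Sequence, Tuple, Union
--
-- def _long_bracket_level(text: str, i: int) -> Optional[int]:
--     """
--     If text[i:] starts a Lua long-bracket opener: [=*[ , return '=' count; else None.
--     Examples: [[ -> 0, [=[ -> 1, [==[ -> 2
--     """
--     n = len(text)
--     if i >= n or text[i] != "[":
--         return None
--     j = i + 1
--     while j < n and text[j] == "=":
--         j += 1
--     if j < n and text[j] == "[":
--         return j - i - 1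
--     return None
-- ===== SOURCE B (Python) =====
-- def _opener(s: str):
--     """Level of a long-bracket opener at the start of s, by peeling one '=' per step."""
--     if s.startswith('[['):
--         return 0
--     if s.startswith('[='):
--         lvl = _opener('[' + s[2:])
--         return None if lvl is None else lvl + 1
--     return None
--
--
-- def _long_bracket_level(text: str, i: int):
--     """Recursive peel: [[ is level 0; [=REST has the level of [REST plus one."""
--     if 0 <= i < len(text):
--         return _opener(text[i:])
--     return None
-- ===== Notes on version B (the rewrite author's own statement) =====
-- stated objective: alternative
-- what changed: Replaces A's iterative pointer scan over the '=' run with a structural recursion that peels one '=' per call, reducing an opener [=^k[ to [=^(k-1)[ until the base case [[.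
-- outside the precondition, e.g. on _long_bracket_level('[=[', -3): A returns 1, B returns None; on _long_bracket_level('', -1): A raises IndexError, B returns None
import Mathlib
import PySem

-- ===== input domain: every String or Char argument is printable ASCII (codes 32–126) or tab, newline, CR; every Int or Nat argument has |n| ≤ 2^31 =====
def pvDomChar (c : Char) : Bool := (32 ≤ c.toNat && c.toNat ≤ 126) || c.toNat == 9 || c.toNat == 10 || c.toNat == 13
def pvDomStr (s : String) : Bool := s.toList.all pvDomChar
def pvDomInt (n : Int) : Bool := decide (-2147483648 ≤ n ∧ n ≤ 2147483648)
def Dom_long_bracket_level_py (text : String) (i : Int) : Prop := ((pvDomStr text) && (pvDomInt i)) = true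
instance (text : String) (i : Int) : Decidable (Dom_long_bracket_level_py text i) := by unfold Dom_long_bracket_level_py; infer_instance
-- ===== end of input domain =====

-- B replaces A's iterative pointer scan by a structural recursion peeling one '=' per step ([=REST = 1 + level of [REST); equal on all i ≥ 0.


-- ===== PORT A =====
-- the loop 'while j < n and text[j] == "=": j += 1', returning the final j
def aWhile (cs : List Char) (n j : Int) : Int :=
  if _h : j < n then
    if PySem.List.pyGet? cs j = some '=' then aWhile cs n (j + 1) else j
  else j
termination_by (n - j).toNat
decreasing_by omega

def long_bracket_level_py (text : String) (i : Int) : Option Int :=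
  if i ≥ (text.toList.length : Int) then none
  else if PySem.List.pyGet? text.toList i ≠ some '[' then none
  else
    let j := aWhile text.toList (text.toList.length : Int) (i + 1)
    if j < (text.toList.length : Int) ∧ PySem.List.pyGet? text.toList j = some '[' then
      some (j - i - 1)
    else none

-- ===== PORT B =====
-- '_opener': recursion peeling one '=' per call; '[' + s[2:] becomes '[' :: s.drop 2
def bOpener (s : List Char) : Option Int :=
  if PySem.Chars.startswith s ['[', '['] then some 0
  else if h : PySem.Chars.startswith s ['[', '='] then
    match bOpener ('[' :: s.drop 2) with
    | none => none
    | some lvl => some (lvl + 1)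
  else none
termination_by s.length
decreasing_by
  have hp : ['[', '='] <+: s := (PySem.Chars.startswith_iff s ['[', '=']).mp h
  have := hp.length_le
  simp at this ⊢
  omega

def long_bracket_level_py_alt (text : String) (i : Int) : Option Int :=
  if 0 ≤ i ∧ i < (text.toList.length : Int) then
    bOpener (PySem.List.slice text.toList (some i) none)
  else none

-- ===== PRECONDITION & SPEC =====
-- Pre_ keeps the natural position domain 0 ≤ i: for i < -len(text) A raises IndexError,
-- and for -len(text) ≤ i < 0 A's negative-index wraparound scan (which can wrap past the
-- string end back to index 0) is an accident of Python indexing; B returns None there.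
def Pre_long_bracket_level_py (text : String) (i : Int) : Prop := 0 ≤ i
instance (text : String) (i : Int) : Decidable (Pre_long_bracket_level_py text i) := by
  unfold Pre_long_bracket_level_py; infer_instance

def pvWitness_long_bracket_level_py : String × Int := ("[==[", 0)

def Spec_long_bracket_level_py (text : String) (i : Int) (out : Option Int) : Prop := out = long_bracket_level_py_alt text i
instance (text : String) (i : Int) (out : Option Int) : Decidable (Spec_long_bracket_level_py text i out) := by unfold Spec_long_bracket_level_py; infer_instance

-- ===== CLAIM (what is proved, stated in full; the proofs are below) =====
def Claim_equal_long_bracket_level_py : Prop := ∀ (text : String) (i : Int), Dom_long_bracket_level_py text i → Pre_long_bracket_level_py text i → Spec_long_bracket_level_py text i (long_bracket_level_py text i)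

-- ===== LEMMAS AND PROOFS =====

-- closed characterization of B's recursion on a tail starting with '['
lemma bOpener_cons (t : List Char) :
    bOpener ('[' :: t) =
      (if t[(t.takeWhile (· == '=')).length]? = some '[' then
        some ((t.takeWhile (· == '=')).length : Int) else none) := by
  induction t with
  | nil =>
    rw [bOpener]
    simp [PySem.Chars.startswith_iff, List.cons_prefix_cons]
  | cons c t' ih =>
    rw [bOpener]
    by_cases hc1 : c = '['
    · subst hc1
      rw [if_pos (by simp [PySem.Chars.startswith_iff, List.cons_prefix_cons])]
      simp [List.takeWhile]
    · by_cases hc2 : c = '='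
      · subst hc2
        rw [if_neg (by simp [PySem.Chars.startswith_iff, List.cons_prefix_cons])]
        rw [dif_pos (by simp [PySem.Chars.startswith_iff, List.cons_prefix_cons])]
        have hdrop : ('[' :: '=' :: t').drop 2 = t' := rfl
        rw [hdrop, ih]
        simp only [List.takeWhile_cons]
        norm_num
        split_ifs with h
        · push_cast; ring_nf
        · rfl
      · rw [if_neg (by simp [PySem.Chars.startswith_iff, List.cons_prefix_cons]; exact fun h => hc1 h.symm),
            dif_neg (by simp [PySem.Chars.startswith_iff, List.cons_prefix_cons]; exact fun h => hc2 h.symm)]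
        simp [List.takeWhile_cons, hc2, hc1]

-- characterization of A's while loop (final index s)
lemma aWhile_spec (cs : List Char) :
    ∀ fuel p : Nat, cs.length - p = fuel → p ≤ cs.length →
      ∃ s : Nat, aWhile cs (cs.length : Int) (p : Int) = (s : Int) ∧
        p ≤ s ∧ s ≤ cs.length ∧
        (∀ k, p ≤ k → k < s → cs[k]? = some '=') ∧
        (s < cs.length → cs[s]? ≠ some '=') := by
  intro fuel
  induction fuel with
  | zero =>
    intro p hf hp
    have hpl : p = cs.length := by omega
    refine ⟨p, ?_, le_rfl, by omega, by omega, by omega⟩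
    rw [aWhile]
    simp [hpl]
  | succ m ih =>
    intro p hf hp
    have hlt : p < cs.length := by omega
    rw [aWhile]
    rw [dif_pos (by exact_mod_cast hlt)]
    by_cases hc : PySem.List.pyGet? cs (p : Int) = some '='
    · rw [if_pos hc]
      have hpg : cs[p]? = some '=' := by
        simpa [PySem.List.pyGet?_natCast] using hc
      obtain ⟨s, h1, h2, h3, h4, h5⟩ := ih (p + 1) (by omega) (by omega)
      refine ⟨s, ?_, by omega, h3, ?_, h5⟩
      · rw [← h1]; norm_cast
      · intro k hk1 hk2
        rcases Nat.eq_or_lt_of_le hk1 with rfl | hk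
        · exact hpg
        · exact h4 k hk hk2
    · rw [if_neg hc]
      refine ⟨p, rfl, le_rfl, by omega, by omega, ?_⟩
      intro _ h
      exact hc (by simpa [PySem.List.pyGet?_natCast] using h)

-- the index conditions of aWhile_spec pin down the takeWhile length
lemma takeWhile_len (l : List Char) (s : Nat) (hs : s ≤ l.length)
    (h1 : ∀ k, k < s → l[k]? = some '=')
    (h2 : s < l.length → l[s]? ≠ some '=') :
    (l.takeWhile (· == '=')).length = s := by
  induction l generalizing s with
  | nil =>
    simp only [List.length_nil, Nat.le_zero] at hs
    subst hs
    simp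
  | cons c l' ih =>
    cases s with
    | zero =>
      have hc : c ≠ '=' := by
        intro hc
        exact h2 (by simp) (by simp [hc])
      simp [List.takeWhile_cons, hc]
    | succ s' =>
      have hc : c = '=' := by
        have := h1 0 (by omega)
        simpa using this
      subst hc
      simp only [List.takeWhile_cons, beq_self_eq_true, if_true, List.length_cons]
      rw [ih s' (by simp at hs; omega)
          (fun k hk => by simpa using h1 (k + 1) (by omega))
          (fun hlt => by simpa using h2 (by simp; omega))]

-- ===== VERDICT (by name: the statement is the Claim_ definition above) =====
theorem long_bracket_level_py_spec : Claim_equal_long_bracket_level_py := by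
  intro text i _hdom hpre
  unfold Spec_long_bracket_level_py long_bracket_level_py long_bracket_level_py_alt
  unfold Pre_long_bracket_level_py at hpre
  set cs := text.toList with hcs
  by_cases hge : i ≥ (cs.length : Int)
  · rw [if_pos hge, if_neg (by omega)]
  · rw [if_neg hge]
    obtain ⟨iN, rfl⟩ : ∃ iN : Nat, i = (iN : Int) := ⟨i.toNat, (Int.toNat_of_nonneg hpre).symm⟩
    have hiN : iN < cs.length := by exact_mod_cast lt_of_not_ge hge
    have hB : (0 : Int) ≤ (iN : Int) ∧ (iN : Int) < (cs.length : Int) := ⟨by positivity, by omega⟩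
    rw [if_pos hB]
    have hsl : PySem.List.slice cs (some (iN : Int)) none = cs.drop iN :=
      PySem.List.slice_from_natCast cs iN
    have hdec : cs.drop iN = cs[iN] :: cs.drop (iN + 1) := List.drop_eq_getElem_cons hiN
    by_cases hbr : PySem.List.pyGet? cs (iN : Int) ≠ some '['
    · rw [if_pos hbr, hsl, hdec]
      have hne : cs[iN] ≠ '[' := by
        intro h
        exact hbr (by simp [PySem.List.pyGet?_natCast, List.getElem?_eq_getElem hiN, h])
      rw [bOpener]
      rw [if_neg (by { rw [PySem.Chars.startswith_iff, List.cons_prefix_cons]; rintro ⟨h1, -⟩; exact hne h1.symm }),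
          dif_neg (by { rw [PySem.Chars.startswith_iff, List.cons_prefix_cons]; rintro ⟨h1, -⟩; exact hne h1.symm })]
    · rw [if_neg hbr, hsl, hdec]
      rw [ne_eq, not_not] at hbr
      have hhd : cs[iN] = '[' := by
        rw [PySem.List.pyGet?_natCast, List.getElem?_eq_getElem hiN] at hbr
        exact Option.some.inj hbr
      rw [hhd, bOpener_cons]
      set t := cs.drop (iN + 1) with ht
      obtain ⟨sF, hs, hs1, hs2, hs3, hs4⟩ :=
        aWhile_spec cs (cs.length - (iN + 1)) (iN + 1) rfl (by omega)
      have hcast : (iN : Int) + 1 = ((iN + 1 : Nat) : Int) := by push_cast; ring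
      simp only []
      rw [hcast, hs]
      have htlen : t.length = cs.length - (iN + 1) := by simp [ht]
      have hget : ∀ k : Nat, t[k]? = cs[iN + 1 + k]? := by
        intro k
        rw [ht, List.getElem?_drop]
      have hk : (t.takeWhile (· == '=')).length = sF - (iN + 1) := by
        apply takeWhile_len
        · omega
        · intro k hk
          rw [hget]
          exact hs3 (iN + 1 + k) (by omega) (by omega)
        · intro hlt h
          rw [hget] at h
          have hsF : iN + 1 + (sF - (iN + 1)) = sF := by omega
          rw [hsF] at h
          exact hs4 (by omega) h
      rw [hk]
      have hts : t[sF - (iN + 1)]? = cs[sF]? := by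
        rw [hget]
        congr 1
        omega
      by_cases hA : (sF : Int) < (cs.length : Int) ∧ PySem.List.pyGet? cs (sF : Int) = some '['
      · rw [if_pos hA]
        rw [if_pos (by rw [hts]; rw [PySem.List.pyGet?_natCast] at hA; exact hA.2)]
        congr 1
        omega
      · rw [if_neg hA, if_neg ?_]
        intro h
        rw [hts] at h
        apply hA
        have hsFlen : sF < cs.length := by
          by_contra hc
          rw [List.getElem?_eq_none (by omega)] at h
          exact absurd h (by simp)
        exact ⟨by exact_mod_cast hsFlen, by rw [PySem.List.pyGet?_natCast]; exact h⟩
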